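-- pv_equiv track=rewrite | github.com/lastseenjustnow/python-algo | educative/dynamic_programming/solutions.py | scoring_options
-- ===== SOURCE A (Python) =====
-- def scoring_options(n):
--
--     memo = [[None for _ in range(3)] for _ in range(n)]
--     runs = [1, 2, 4]
--
--     def rec(residual, pointer):
--         if pointer > len(runs) - 1:
--             return 0
--
--         if residual < runs[pointer]:
--             memo[residual - 1][pointer] = 0
--             return 0
--
--         if memo[residual - 1][pointer] is not None:
--             return memo[residual - 1][pointer]
--
--         if residual == runs[pointer]:
--             memo[residual - 1][pointer] = 1
--             return 1
--
--         first_term = rec(residual - runs[pointer], 0)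
--         second_term = rec(residual, pointer + 1)
--         memo[residual - 1][pointer] = first_term + second_term
--         return memo[residual - 1][pointer]
--
--     return rec(n, 0)
-- ===== SOURCE B (Python) =====
-- def scoring_options(n):
--     # bottom-up linear recurrence: ways[k] = ways[k-1] + ways[k-2] + ways[k-4]
--     f = [1, 1, 2, 3]          # counts for totals 0, 1, 2, 3
--     for _ in range(4, n + 1):
--         f = [f[1], f[2], f[3], f[3] + f[2] + f[0]]
--     return f[min(n, 3)]
-- ===== Notes on version B (the rewrite author's own statement) =====
-- stated objective: alternative
-- what changed: replaces top-down memoized recursion over (residual, coin-pointer) with a bottom-up sliding-window iteration of the linear recurrence f(k)=f(k-1)+f(k-2)+f(k-4), keeping only the last four values and using no recursion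
-- outside the precondition, e.g. on scoring_options(0): A raises IndexError, B returns 1
import Mathlib
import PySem

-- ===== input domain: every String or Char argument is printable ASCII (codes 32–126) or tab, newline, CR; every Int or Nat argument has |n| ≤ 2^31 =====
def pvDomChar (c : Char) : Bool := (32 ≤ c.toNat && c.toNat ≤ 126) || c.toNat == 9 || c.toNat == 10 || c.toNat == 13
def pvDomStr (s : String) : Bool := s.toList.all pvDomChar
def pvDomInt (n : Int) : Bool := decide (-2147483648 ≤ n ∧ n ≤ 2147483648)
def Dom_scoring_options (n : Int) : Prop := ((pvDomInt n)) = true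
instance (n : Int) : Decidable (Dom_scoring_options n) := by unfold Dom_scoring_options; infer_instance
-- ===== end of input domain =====

-- B replaces A's top-down memoized recursion by a bottom-up sliding-window
-- iteration of the recurrence f(k)=f(k-1)+f(k-2)+f(k-4) (objective: alternative).

-- ===== PORT A =====
-- runs = [1, 2, 4]
def pvRuns : List Int := [1, 2, 4]

-- memo[r][p] read (Python: memo[residual-1][pointer]); outer index may be negative (wraps)
def pvGetCell (memo : List (List (Option Int))) (r : Int) (p : Nat) : Option Int :=
  ((PySem.List.pyGet? memo r).bind (fun row => row[p]?)).join

-- memo[r][p] = v (Python list assignment; r may be negative → wraps; out of range unreachable under Pre_)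
def pvSetCell (memo : List (List (Option Int))) (r : Int) (p : Nat) (v : Int) :
    List (List (Option Int)) :=
  match memo[(if r < 0 then r + memo.length else r).toNat]? with
  | some row => memo.set (if r < 0 then r + memo.length else r).toNat (row.set p (some v))
  | none => memo

-- termination helper for pvRec (cited in decreasing_by)
theorem pvRuns_ge_one (p : Nat) (hp : p ≤ 2) : 1 ≤ pvRuns.getD p 0 := by
  interval_cases p <;> decide

-- the inner 'rec(residual, pointer)', threading the memo table through
def pvRec (memo : List (List (Option Int))) (residual : Int) (pointer : Nat) :
    List (List (Option Int)) × Int :=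
  if _h3 : pointer > pvRuns.length - 1 then (memo, 0)
  else
    let rp := pvRuns.getD pointer 0
    if _hlt : residual < rp then (pvSetCell memo (residual - 1) pointer 0, 0)
    else
      match pvGetCell memo (residual - 1) pointer with
      | some v => (memo, v)
      | none =>
        if _heq : residual = rp then (pvSetCell memo (residual - 1) pointer 1, 1)
        else
          let r1 := pvRec memo (residual - rp) 0
          let r2 := pvRec r1.1 residual (pointer + 1)
          (pvSetCell r2.1 (residual - 1) pointer (r1.2 + r2.2), r1.2 + r2.2)
termination_by residual.toNat * 3 + (3 - pointer)
decreasing_by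
  · have hl : pvRuns.length = 3 := rfl
    have h1 : 1 ≤ pvRuns.getD pointer 0 := pvRuns_ge_one pointer (by omega)
    omega
  · have hl : pvRuns.length = 3 := rfl
    omega

def scoring_options (n : Int) : Int :=
  let memo := List.replicate n.toNat (List.replicate 3 (none : Option Int))
  (pvRec memo n 0).2

-- ===== PORT B =====
def pvStep (f : List Int) : List Int :=
  [f.getD 1 0, f.getD 2 0, f.getD 3 0, f.getD 3 0 + f.getD 2 0 + f.getD 0 0]

def scoring_options_alt (n : Int) : Int :=
  (PySem.List.pyGet?
    ((PySem.List.pyRange 4 (n + 1) 1).foldl (fun f _ => pvStep f) [1, 1, 2, 3])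
    (min n 3)).getD 0

-- ===== PRECONDITION & SPEC =====
-- Pre_ excludes n ≤ 0, where A's empty memo makes memo[-1] raise IndexError
def Pre_scoring_options (n : Int) : Prop := 1 ≤ n
instance (n : Int) : Decidable (Pre_scoring_options n) := by unfold Pre_scoring_options; infer_instance
def pvWitness_scoring_options : Int := (5)

def Spec_scoring_options (n : Int) (out : Int) : Prop := out = scoring_options_alt n
instance (n : Int) (out : Int) : Decidable (Spec_scoring_options n out) := by unfold Spec_scoring_options; infer_instance

-- ===== CLAIM (what is proved, stated in full; the proofs are below) =====
def Claim_equal_scoring_options : Prop := ∀ (n : Int), Dom_scoring_options n → Pre_scoring_options n → Spec_scoring_options n (scoring_options n)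

-- ===== LEMMAS AND PROOFS =====

-- the pure (memo-free) value of rec(residual, pointer)
def pvH (residual : Int) (pointer : Nat) : Int :=
  if pointer > 2 then 0
  else
    let rp := pvRuns.getD pointer 0
    if residual < rp then 0
    else if residual = rp then 1
    else pvH (residual - rp) 0 + pvH residual (pointer + 1)
termination_by residual.toNat * 3 + (3 - pointer)
decreasing_by
  · have h1 : 1 ≤ pvRuns.getD pointer 0 := pvRuns_ge_one pointer (by omega)
    omega
  · omega

-- the mathematical sequence: compositions of k into parts {1,2,4}
def pvF : Nat → Int
  | 0 => 1
  | 1 => 1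
  | 2 => 2
  | 3 => 3
  | (k + 4) => pvF (k + 3) + pvF (k + 2) + pvF k

theorem pvF_add4 (k : Nat) : pvF (k + 4) = pvF (k + 3) + pvF (k + 2) + pvF k := by rw [pvF]

-- branch unfoldings of pvH
theorem pvH_gt (residual : Int) (pointer : Nat) (h3 : pointer > 2) : pvH residual pointer = 0 := by
  rw [pvH, if_pos h3]

theorem pvH_lt (residual : Int) (pointer : Nat) (h3 : ¬ pointer > 2)
    (hlt : residual < pvRuns.getD pointer 0) : pvH residual pointer = 0 := by
  rw [pvH, if_neg h3]
  show (if residual < pvRuns.getD pointer 0 then (0 : Int)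
    else if residual = pvRuns.getD pointer 0 then 1
    else pvH (residual - pvRuns.getD pointer 0) 0 + pvH residual (pointer + 1)) = 0
  rw [if_pos hlt]

theorem pvH_eqv (residual : Int) (pointer : Nat) (h3 : ¬ pointer > 2)
    (hlt : ¬ residual < pvRuns.getD pointer 0) (heq : residual = pvRuns.getD pointer 0) :
    pvH residual pointer = 1 := by
  rw [pvH, if_neg h3]
  show (if residual < pvRuns.getD pointer 0 then (0 : Int)
    else if residual = pvRuns.getD pointer 0 then 1
    else pvH (residual - pvRuns.getD pointer 0) 0 + pvH residual (pointer + 1)) = 1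
  rw [if_neg hlt, if_pos heq]

theorem pvH_recur (residual : Int) (pointer : Nat) (h3 : ¬ pointer > 2)
    (hlt : ¬ residual < pvRuns.getD pointer 0) (heq : ¬ residual = pvRuns.getD pointer 0) :
    pvH residual pointer = pvH (residual - pvRuns.getD pointer 0) 0 + pvH residual (pointer + 1) := by
  rw [pvH, if_neg h3]
  show (if residual < pvRuns.getD pointer 0 then (0 : Int)
    else if residual = pvRuns.getD pointer 0 then 1
    else pvH (residual - pvRuns.getD pointer 0) 0 + pvH residual (pointer + 1)) = _
  rw [if_neg hlt, if_neg heq]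

-- memo invariant: every filled cell equals the pure value
def pvValid (memo : List (List (Option Int))) : Prop :=
  ∀ (i p : Nat) (row : List (Option Int)) (v : Int),
    memo[i]? = some row → row[p]? = some (some v) → v = pvH ((i : Int) + 1) p

theorem pvValid_set (memo : List (List (Option Int))) (r : Int) (p : Nat) (v : Int)
    (hm : pvValid memo) (hr : 0 ≤ r) (hv : v = pvH (r + 1) p) :
    pvValid (pvSetCell memo r p v) := by
  unfold pvSetCell
  have hif : (if r < 0 then r + (memo.length : Int) else r) = r := by omega
  rw [hif]
  split
  case _ row hrow0 =>
    have hrow : memo[r.toNat]? = some row := hrow0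
    intro i q row' w hi hq
    by_cases hii : i = r.toNat
    · have hlen : r.toNat < memo.length := (List.getElem?_eq_some_iff.mp hrow).1
      rw [hii, List.getElem?_set_self hlen] at hi
      cases hi
      by_cases hqq : q = p
      · by_cases hql : p < row.length
        · rw [hqq, List.getElem?_set_self hql] at hq
          cases hq
          rw [hv, hii, hqq]; congr 1; omega
        · rw [List.getElem?_eq_none (by simp [List.length_set]; omega)] at hq; cases hq
      · rw [List.getElem?_set_ne (by omega)] at hq
        exact hm i q row w (by rw [hii]; exact hrow) hq
    · rw [List.getElem?_set_ne (by omega)] at hi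
      exact hm i q row' w hi hq
  case _ => exact hm

theorem pvGetCell_valid (memo : List (List (Option Int))) (r : Int) (p : Nat) (v : Int)
    (hm : pvValid memo) (hr : 0 ≤ r) (h : pvGetCell memo r p = some v) :
    v = pvH (r + 1) p := by
  unfold pvGetCell at h
  rw [PySem.List.pyGet?_of_nonneg _ hr] at h
  cases hrow : memo[r.toNat]? with
  | none => simp [hrow] at h
  | some row =>
    cases hq : row[p]? with
    | none => simp [hrow, hq] at h
    | some o =>
      have ho : o = some v := by simpa [hrow, hq] using h
      have hv' := hm r.toNat p row v hrow (by rw [hq, ho])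
      rwa [show ((r.toNat : Int) + 1) = r + 1 by omega] at hv'

-- main invariant lemma: with a valid memo, pvRec returns the pure value and a valid memo
theorem pvRec_correct (memo : List (List (Option Int))) (residual : Int) (pointer : Nat)
    (h1 : 1 ≤ residual) (hm : pvValid memo) :
    (pvRec memo residual pointer).2 = pvH residual pointer ∧ pvValid (pvRec memo residual pointer).1 := by
  have hlen : pvRuns.length - 1 = 2 := rfl
  rw [pvRec, hlen]
  by_cases h3 : pointer > 2
  · rw [dif_pos h3, pvH_gt _ _ h3]
    exact ⟨rfl, hm⟩
  · rw [dif_neg h3]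
    dsimp only
    have hres : residual - 1 + 1 = residual := by ring
    by_cases hlt : residual < pvRuns.getD pointer 0
    · rw [dif_pos hlt]
      exact ⟨(pvH_lt _ _ h3 hlt).symm,
        pvValid_set _ _ _ _ hm (by have := pvRuns_ge_one pointer (by omega); omega)
          (by rw [hres, pvH_lt _ _ h3 hlt])⟩
    · rw [dif_neg hlt]
      cases hc : pvGetCell memo (residual - 1) pointer with
      | some v =>
        have hv := pvGetCell_valid memo (residual - 1) pointer v hm (by omega) hc
        rw [hres] at hv
        dsimp only
        exact ⟨hv, hm⟩
      | none =>
        by_cases heq : residual = pvRuns.getD pointer 0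
        · rw [dif_pos heq]
          exact ⟨(pvH_eqv _ _ h3 hlt heq).symm,
            pvValid_set _ _ _ _ hm (by omega) (by rw [hres, pvH_eqv _ _ h3 hlt heq])⟩
        · rw [dif_neg heq]
          have hrp1 : 1 ≤ pvRuns.getD pointer 0 := pvRuns_ge_one pointer (by omega)
          have hgt : pvRuns.getD pointer 0 < residual := by omega
          obtain ⟨ih1v, ih1m⟩ := pvRec_correct memo (residual - pvRuns.getD pointer 0) 0
            (by omega) hm
          obtain ⟨ih2v, ih2m⟩ := pvRec_correct (pvRec memo (residual - pvRuns.getD pointer 0) 0).1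
            residual (pointer + 1) h1 ih1m
          dsimp only
          constructor
          · rw [ih1v, ih2v, pvH_recur _ _ h3 hlt heq]
          · exact pvValid_set _ _ _ _ ih2m (by omega)
              (by rw [hres, ih1v, ih2v, pvH_recur _ _ h3 hlt heq])
termination_by residual.toNat * 3 + (3 - pointer)
decreasing_by
  · omega
  · omega

theorem pvValid_init (n : Nat) :
    pvValid (List.replicate n (List.replicate 3 (none : Option Int))) := by
  intro i p row v hi hp
  have hrow : row = List.replicate 3 (none : Option Int) := by
    rcases List.getElem?_eq_some_iff.mp hi with ⟨h, he⟩
    simpa using he.symm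
  subst hrow
  rcases List.getElem?_eq_some_iff.mp hp with ⟨h, he⟩
  have hp3 : p < 3 := by simpa using h
  interval_cases p <;> simp at he

-- unfoldings of pvH at each pointer value
theorem pvH_p3 (n : Int) : pvH n 3 = 0 := by rw [pvH]; simp

theorem pvH_p2 (n : Int) : pvH n 2 = if n < 4 then 0 else if n = 4 then 1 else pvH (n - 4) 0 := by
  rw [pvH]; simp [pvRuns, pvH_p3]

theorem pvH_p1 (n : Int) :
    pvH n 1 = if n < 2 then 0 else if n = 2 then 1 else pvH (n - 2) 0 + pvH n 2 := by
  rw [pvH]; simp [pvRuns]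

theorem pvH_p0 (n : Int) :
    pvH n 0 = if n < 1 then 0 else if n = 1 then 1 else pvH (n - 1) 0 + pvH n 1 := by
  rw [pvH]; simp [pvRuns]

theorem pvH_1 : pvH 1 0 = 1 := by rw [pvH_p0]; norm_num
theorem pvH_2 : pvH 2 0 = 2 := by rw [pvH_p0]; norm_num [pvH_p1, pvH_1]
theorem pvH_3 : pvH 3 0 = 3 := by rw [pvH_p0]; norm_num [pvH_p1, pvH_p2, pvH_1, pvH_2]
theorem pvH_4 : pvH 4 0 = 6 := by rw [pvH_p0]; norm_num [pvH_p1, pvH_p2, pvH_1, pvH_2, pvH_3]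

-- A's pure value is the sequence pvF
theorem pvH_eq_F : ∀ (k : Nat) (n : Int), 1 ≤ n → n = (k : Int) → pvH n 0 = pvF k := by
  intro k
  induction k using Nat.strong_induction_on with
  | _ k ih =>
    intro n h1 hk
    match k with
    | 0 => omega
    | 1 =>
      have hn : n = 1 := by omega
      subst hn; rw [pvH_1]; norm_num [pvF]
    | 2 =>
      have hn : n = 2 := by omega
      subst hn; rw [pvH_2]; norm_num [pvF]
    | 3 =>
      have hn : n = 3 := by omega
      subst hn; rw [pvH_3]; norm_num [pvF]
    | 4 =>
      have hn : n = 4 := by omega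
      subst hn; rw [pvH_4]; norm_num [pvF]
    | (m + 5) =>
      have e1 : pvH (n - 1) 0 = pvF (m + 4) := ih (m + 4) (by omega) (n - 1) (by omega) (by omega)
      have e2 : pvH (n - 2) 0 = pvF (m + 3) := ih (m + 3) (by omega) (n - 2) (by omega) (by omega)
      have e4 : pvH (n - 4) 0 = pvF (m + 1) := ih (m + 1) (by omega) (n - 4) (by omega) (by omega)
      have hF : pvF (m + 5) = pvF (m + 4) + pvF (m + 3) + pvF (m + 1) := by
        have h := pvF_add4 (m + 1)
        rw [show m + 1 + 4 = m + 5 by omega, show m + 1 + 3 = m + 4 by omega,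
          show m + 1 + 2 = m + 3 by omega] at h
        exact h
      rw [pvH_p0, if_neg (by omega), if_neg (by omega), pvH_p1, if_neg (by omega),
        if_neg (by omega), pvH_p2, if_neg (by omega), if_neg (by omega), e1, e2, e4, hF]
      ring

-- B side: iterating pvStep k times from the seed gives a window of pvF
def pvIter : Nat → List Int
  | 0 => [1, 1, 2, 3]
  | (k + 1) => pvStep (pvIter k)

theorem pvStep_quad (a b c d : Int) : pvStep [a, b, c, d] = [b, c, d, d + c + a] := rfl

theorem pvIter_eq_F (k : Nat) :
    pvIter k = [pvF k, pvF (k + 1), pvF (k + 2), pvF (k + 3)] := by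
  induction k with
  | zero => rfl
  | succ k ih =>
    rw [pvIter, ih, pvStep_quad,
      show k + 1 + 1 = k + 2 by omega, show k + 1 + 2 = k + 3 by omega,
      show k + 1 + 3 = k + 4 by omega, pvF_add4]

theorem foldl_step_eq_iter (l : List Int) (k : Nat) :
    l.foldl (fun f _ => pvStep f) (pvIter k) = pvIter (k + l.length) := by
  induction l generalizing k with
  | nil => rfl
  | cons x xs ih =>
    rw [List.foldl_cons]
    have hs : pvStep (pvIter k) = pvIter (k + 1) := rfl
    rw [hs, ih]
    congr 1
    simp [List.length_cons]
    omega

theorem alt_eq_F (n : Int) (h1 : 1 ≤ n) : scoring_options_alt n = pvF n.toNat := by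
  unfold scoring_options_alt
  have hfold : (PySem.List.pyRange 4 (n + 1) 1).foldl (fun f _ => pvStep f) [1, 1, 2, 3]
      = pvIter (n + 1 - 4).toNat := by
    have h := foldl_step_eq_iter (PySem.List.pyRange 4 (n + 1) 1) 0
    rw [show pvIter 0 = [1, 1, 2, 3] from rfl] at h
    rw [h, PySem.List.length_pyRange_one, Nat.zero_add]
  rw [hfold, pvIter_eq_F]
  by_cases h4 : 4 ≤ n
  · rw [show min n 3 = 3 by omega, PySem.List.pyGet?_of_nonneg _ (by norm_num),
      show ((3 : Int)).toNat = 3 from rfl,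
      show ∀ a b c d : Int, [a, b, c, d][(3 : Nat)]? = some d from fun _ _ _ _ => rfl,
      Option.getD_some]
    congr 1
    omega
  · rw [show (n + 1 - 4).toNat = 0 by omega]
    have hn3 : n < 4 := by omega
    interval_cases n
    · rfl
    · rfl
    · rfl

-- ===== VERDICT (by name: the statement is the Claim_ definition above) =====
theorem scoring_options_spec : Claim_equal_scoring_options := by
  intro n _ hpre
  unfold Spec_scoring_options scoring_options
  have hpre' : (1 : Int) ≤ n := hpre
  obtain ⟨hv, _⟩ := pvRec_correct (List.replicate n.toNat (List.replicate 3 none)) n 0 hpre'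
    (pvValid_init n.toNat)
  rw [hv, pvH_eq_F n.toNat n hpre' (by omega), alt_eq_F n hpre']
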